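-- pv_equiv track=rewrite | github.com/nartannt/mono_testing | scripts/parse_res.py | split_res
-- ===== SOURCE A (Python) =====
-- def split_res(all_lines):
--     res = []
--     curr_block = []
--     curr_opt = ""
--     for line in all_lines:
--         if line[0] == "#":
--             res.append((curr_opt, curr_block))
--             curr_block = []
--             curr_opt = line.strip()
--         else:
--             curr_block.append(line.strip())
--     res.append((curr_opt, curr_block))
--     return res
-- ===== SOURCE B (Python) =====
-- def split_res(all_lines):
--     # Two staged passes: collect the indices of header lines (line[0] == "#"),
--     # then build every (header, block) pair by slicing between consecutive headers.
--     n = len(all_lines)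
--     hs = [i for i, line in enumerate(all_lines) if line[0] == "#"]
--     first = hs[0] if hs else n
--     res = [("", [l.strip() for l in all_lines[:first]])]
--     for h, e in zip(hs, hs[1:] + [n]):
--         res.append((all_lines[h].strip(), [l.strip() for l in all_lines[h + 1:e]]))
--     return res
-- ===== Notes on version B (the rewrite author's own statement) =====
-- stated objective: alternative
-- what changed: B is two staged passes: it first collects the indices of header lines with enumerate, then builds each (header, block) pair by slicing all_lines between consecutive header indices, instead of A's single forward loop mutating a current-option/current-block accumulator.
import Mathlib
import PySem

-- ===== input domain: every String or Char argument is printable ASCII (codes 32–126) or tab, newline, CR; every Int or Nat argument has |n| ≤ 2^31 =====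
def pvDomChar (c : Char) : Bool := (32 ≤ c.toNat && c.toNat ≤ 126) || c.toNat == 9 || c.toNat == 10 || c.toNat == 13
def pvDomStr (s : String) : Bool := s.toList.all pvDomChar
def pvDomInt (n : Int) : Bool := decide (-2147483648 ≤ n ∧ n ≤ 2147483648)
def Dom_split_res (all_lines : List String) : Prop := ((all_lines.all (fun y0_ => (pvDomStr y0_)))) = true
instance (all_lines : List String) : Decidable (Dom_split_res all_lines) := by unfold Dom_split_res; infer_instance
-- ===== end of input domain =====

-- B replaces A's single accumulate-and-flush loop by two staged passes: collect the
-- header-line indices, then slice all_lines between consecutive headers; same O(n) cost.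

-- ===== PORT A =====
-- forward loop, state (res, (curr_block, curr_opt))
def split_res (all_lines : List String) : List (String × List String) :=
  let st := all_lines.foldl
    (fun (st : List (String × List String) × List String × String) line =>
      match PySem.Str.pyGet? line 0 with   -- line[0]; none = IndexError on "", excluded by Pre_
      | some c =>
        if c = '#' then (st.1 ++ [(st.2.2, st.2.1)], ([], PySem.Str.strip line))
        else (st.1, (st.2.1 ++ [PySem.Str.strip line], st.2.2))
      | none => st)
    ([], ([], ""))
  st.1 ++ [(st.2.2, st.2.1)]

-- ===== PORT B =====
-- pass 1: header indices via enumerate; pass 2: one (header, block) pair per slice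
def split_res_alt (all_lines : List String) : List (String × List String) :=
  let n : Int := PySem.List.len all_lines
  let hs : List Int := (PySem.List.enumerate all_lines).filterMap
    (fun p => if (match PySem.Str.pyGet? p.2 0 with | some c => c == '#' | none => false) = true
              then some p.1 else none)   -- line[0] == "#"; "" raises IndexError in Python (outside Pre_)
  let first : Int := match hs with | [] => n | h :: _ => h   -- hs[0] if hs else n
  let res : List (String × List String) :=
    [("", (PySem.List.slice all_lines none (some first)).map PySem.Str.strip)]
  (hs.zip (hs.drop 1 ++ [n])).foldl
    (fun res p =>
      res ++ [(PySem.Str.strip (PySem.List.pyGetD all_lines p.1 ""),   -- all_lines[h]; h always in range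
               (PySem.List.slice all_lines (some (p.1 + 1)) (some p.2)).map PySem.Str.strip)])
    res

-- ===== PRECONDITION & SPEC =====
-- A evaluates line[0] on every line, so it raises IndexError as soon as some line is "";
-- Pre_ excludes exactly the inputs containing an empty-string line.
def Pre_split_res (all_lines : List String) : Prop := ∀ l ∈ all_lines, l.toList ≠ []
instance (all_lines : List String) : Decidable (Pre_split_res all_lines) := by unfold Pre_split_res; infer_instance
def pvWitness_split_res : List String := ["# one", " a ", "b", "#two", "c"]

def Spec_split_res (all_lines : List String) (out : List (String × List String)) : Prop := out = split_res_alt all_lines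
instance (all_lines : List String) (out : List (String × List String)) : Decidable (Spec_split_res all_lines out) := by unfold Spec_split_res; infer_instance

-- ===== CLAIM (what is proved, stated in full; the proofs are below) =====
def Claim_equal_split_res : Prop := ∀ (all_lines : List String), Dom_split_res all_lines → Pre_split_res all_lines → Spec_split_res all_lines (split_res all_lines)

-- ===== LEMMAS AND PROOFS =====

-- "is a header line" test shared by the reference recursions below
def pvHd (l : String) : Bool := match PySem.Str.pyGet? l 0 with | some c => c == '#' | none => false

-- reference recursion for A's loop
def pvGo : List String → String → List String → List (String × List String)
  | [], opt, blk => [(opt, blk)]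
  | l :: ls, opt, blk =>
    if pvHd l then (opt, blk) :: pvGo ls (PySem.Str.strip l) []
    else pvGo ls opt (blk ++ [PySem.Str.strip l])

-- front recursion both ports are reduced to
def pvGoF : List String → List (String × List String)
  | [] => [("", [])]
  | l :: ls =>
    match pvGoF ls with
    | [] => []
    | (_o, b) :: rest =>
      if pvHd l then ("", []) :: (PySem.Str.strip l, b) :: rest
      else ("", PySem.Str.strip l :: b) :: rest

-- Nat-level header indices
def pvHs : List String → List Nat
  | [] => []
  | l :: ls => if pvHd l then 0 :: (pvHs ls).map (· + 1) else (pvHs ls).map (· + 1)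

-- Nat-level restatement of B
def pvBn (ls : List String) : List (String × List String) :=
  ("", (ls.take ((pvHs ls ++ [ls.length]).headD 0)).map PySem.Str.strip)
    :: ((pvHs ls).zip ((pvHs ls).tail ++ [ls.length])).map
         (fun p => (PySem.Str.strip (ls.getD p.1 ""),
                    ((ls.drop (p.1 + 1)).take (p.2 - (p.1 + 1))).map PySem.Str.strip))

theorem pvFoldA (ls : List String) : ∀ (res : List (String × List String)) (blk : List String) (opt : String),
    (∀ l ∈ ls, l.toList ≠ []) →
    (let st := ls.foldl
      (fun (st : List (String × List String) × List String × String) line =>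
        match PySem.Str.pyGet? line 0 with
        | some c =>
          if c = '#' then (st.1 ++ [(st.2.2, st.2.1)], ([], PySem.Str.strip line))
          else (st.1, (st.2.1 ++ [PySem.Str.strip line], st.2.2))
        | none => st)
      (res, (blk, opt))
     st.1 ++ [(st.2.2, st.2.1)]) = res ++ pvGo ls opt blk := by
  induction ls with
  | nil => intro res blk opt _; simp [pvGo]
  | cons l ls ih =>
    intro res blk opt h
    have hne : l.toList ≠ [] := h l (List.mem_cons_self ..)
    obtain ⟨c, cs, hc⟩ := List.exists_cons_of_ne_nil hne
    have hget : PySem.Str.pyGet? l 0 = some c := by simp [hc]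
    simp only [List.foldl_cons, hget, pvGo, pvHd]
    by_cases hcc : c = '#'
    · simp only [hcc, beq_self_eq_true]
      rw [ih _ _ _ (fun x hx => h x (List.mem_cons_of_mem _ hx))]
      simp
    · have : (c == '#') = false := by simpa using hcc
      simp only [this, if_neg hcc, Bool.false_eq_true, if_false]
      exact ih _ _ _ (fun x hx => h x (List.mem_cons_of_mem _ hx))

theorem pvGoF_ne_nil (ls : List String) : pvGoF ls ≠ [] := by
  induction ls with
  | nil => simp [pvGoF]
  | cons l ls ih =>
    obtain ⟨p, rest, hgo⟩ : ∃ p rest, pvGoF ls = p :: rest := by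
      cases hq : pvGoF ls with
      | nil => exact absurd hq ih
      | cons p r => exact ⟨p, r, rfl⟩
    by_cases hl : pvHd l <;> simp [pvGoF, hgo, hl]

theorem pvGo_goF (ls : List String) : ∀ (opt : String) (blk : List String),
    pvGo ls opt blk = match pvGoF ls with
      | [] => [(opt, blk)]
      | (_, b) :: rest => (opt, blk ++ b) :: rest := by
  induction ls with
  | nil => intro opt blk; simp [pvGo, pvGoF]
  | cons l ls ih =>
    intro opt blk
    have hne := pvGoF_ne_nil ls
    obtain ⟨⟨o, b⟩, rest, hgo⟩ : ∃ p rest, pvGoF ls = p :: rest := by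
      cases hq : pvGoF ls with
      | nil => exact absurd hq hne
      | cons p r => exact ⟨p, r, rfl⟩
    by_cases hl : pvHd l
    · simp [pvGo, pvGoF, hl, hgo, ih]
    · simp [pvGo, pvGoF, hl, hgo, ih]


theorem pvGoF_head_fst (ls : List String) : ∃ b rest, pvGoF ls = ("", b) :: rest := by
  induction ls with
  | nil => exact ⟨[], [], rfl⟩
  | cons l ls ih =>
    obtain ⟨b, rest, hgo⟩ := ih
    by_cases hl : pvHd l
    · exact ⟨[], (PySem.Str.strip l, b) :: rest, by simp [pvGoF, hgo, hl]⟩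
    · exact ⟨PySem.Str.strip l :: b, rest, by simp [pvGoF, hgo, hl]⟩

theorem pvHs_enum (ls : List String) : ∀ (s : Int),
    (PySem.List.enumerate ls s).filterMap
      (fun p => if (match PySem.Str.pyGet? p.2 0 with | some c => c == '#' | none => false) = true
                then some p.1 else none)
      = (pvHs ls).map (fun k : Nat => s + (k : Int)) := by
  induction ls with
  | nil => intro s; simp [PySem.List.enumerate_nil, pvHs]
  | cons l ls ih =>
    intro s
    rw [PySem.List.enumerate_cons, List.filterMap_cons, ih (s + 1)]
    by_cases hl : pvHd l
    · have h1 : (match PySem.Str.pyGet? l 0 with | some c => c == '#' | none => false) = true := hl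
      simp only [pvHs, hl, h1, if_pos trivial, List.map_cons, List.map_map]
      refine List.cons_eq_cons.mpr ⟨by simp, ?_⟩
      congr 1; funext k; simp only [Function.comp_apply]; push_cast; ring
    · have h1 : (match PySem.Str.pyGet? l 0 with | some c => c == '#' | none => false) = false := by
        simpa [pvHd] using hl
      simp only [pvHs, hl, Bool.false_eq_true, if_false, h1, List.map_map]
      congr 1; funext k; simp only [Function.comp_apply]; push_cast; ring

theorem pvBn_eq (ls : List String) : split_res_alt ls = pvBn ls := by
  unfold split_res_alt pvBn
  have hcast : ∀ k : Nat, (0 : Int) + (k : Int) = (k : Int) := fun k => by ring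
  rw [pvHs_enum ls 0]
  simp only [hcast]
  have hfirst : (match (pvHs ls).map (fun k : Nat => (k : Int)) with
      | [] => PySem.List.len ls | h :: _ => h)
      = (((pvHs ls ++ [ls.length]).headD 0 : Nat) : Int) := by
    cases h : pvHs ls <;> simp [PySem.List.len_eq]
  rw [hfirst, PySem.List.slice_to_natCast]
  have hzip : ((pvHs ls).map (fun k : Nat => (k : Int))).drop 1 ++ [PySem.List.len ls]
      = ((pvHs ls).drop 1 ++ [ls.length]).map (fun k : Nat => (k : Int)) := by
    simp [PySem.List.len_eq]
  rw [hzip]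
  have hz2 : ((pvHs ls).map (fun k : Nat => (k : Int))).zip
        (((pvHs ls).drop 1 ++ [ls.length]).map (fun k : Nat => (k : Int)))
      = ((pvHs ls).zip ((pvHs ls).drop 1 ++ [ls.length])).map
          (Prod.map (fun k : Nat => (k : Int)) (fun k : Nat => (k : Int))) := List.zip_map
  rw [hz2, PySem.List.foldl_append_singleton_eq_map, List.map_map, ← List.drop_one]
  refine congrArg _ ?_
  apply List.map_congr_left
  intro p _
  obtain ⟨h, e⟩ := p
  simp only [Function.comp_apply, Prod.map_apply]
  rw [PySem.List.pyGetD_natCast]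
  have : ((h : Int) + 1) = ((h + 1 : Nat) : Int) := by push_cast; ring
  rw [this, PySem.List.slice_natCast]

theorem pvZipTail (h : List Nat) (len : Nat) :
    h.zip ((h ++ [len]).tail) = h.zip (h.tail ++ [len]) := by
  cases h <;> simp

theorem pvGshift (ls : List String) (l : String) (p : Nat × Nat) :
    (PySem.Str.strip ((l :: ls).getD (p.1 + 1 + 0) ""),
      (((l :: ls).drop (p.1 + 1 + 1)).take ((p.2 + 1) - (p.1 + 1 + 1))).map PySem.Str.strip)
    = (PySem.Str.strip (ls.getD p.1 ""),
      ((ls.drop (p.1 + 1)).take (p.2 - (p.1 + 1))).map PySem.Str.strip) := by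
  obtain ⟨a, e⟩ := p
  simp [Nat.succ_sub_succ]

theorem pvBn_goF (ls : List String) : pvBn ls = pvGoF ls := by
  induction ls with
  | nil => simp [pvBn, pvGoF, pvHs]
  | cons l ls ih =>
    obtain ⟨c, cs, hsplit⟩ : ∃ c cs, pvHs ls ++ [ls.length] = c :: cs := by
      cases h : pvHs ls with
      | nil => exact ⟨ls.length, [], rfl⟩
      | cons a t => exact ⟨a, t ++ [ls.length], rfl⟩
    have hcs : cs = (pvHs ls ++ [ls.length]).tail := by rw [hsplit]; rfl
    have hheadD : (pvHs ls ++ [ls.length]).headD 0 = c := by rw [hsplit]; rfl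
    have h3 : (pvHs ls).map (· + 1) ++ [ls.length + 1]
        = ((pvHs ls ++ [ls.length]).map (· + 1)) := by simp
    have hgf : pvGoF (l :: ls) =
        if pvHd l then
          ("", []) :: (PySem.Str.strip l,
              (ls.take ((pvHs ls ++ [ls.length]).headD 0)).map PySem.Str.strip) ::
            ((pvHs ls).zip ((pvHs ls).tail ++ [ls.length])).map
              (fun p => (PySem.Str.strip (ls.getD p.1 ""),
                ((ls.drop (p.1 + 1)).take (p.2 - (p.1 + 1))).map PySem.Str.strip))
        else
          ("", PySem.Str.strip l ::
              (ls.take ((pvHs ls ++ [ls.length]).headD 0)).map PySem.Str.strip) ::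
            ((pvHs ls).zip ((pvHs ls).tail ++ [ls.length])).map
              (fun p => (PySem.Str.strip (ls.getD p.1 ""),
                ((ls.drop (p.1 + 1)).take (p.2 - (p.1 + 1))).map PySem.Str.strip)) := by
      rw [pvGoF, ← ih]; rfl
    by_cases hl : pvHd l
    · have hpv : pvHs (l :: ls) = 0 :: (pvHs ls).map (· + 1) := by simp [pvHs, hl]
      rw [hgf, if_pos hl, hheadD]
      unfold pvBn
      rw [hpv]
      simp only [List.length_cons, List.cons_append, List.headD_cons, List.take_zero,
        List.map_nil, List.tail_cons]
      rw [h3, hsplit]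
      simp only [List.map_cons, List.zip_cons_cons, List.zip_map, List.map_map, List.map_cons]
      rw [hcs, pvZipTail]
      refine List.cons_eq_cons.mpr ⟨rfl, ?_⟩
      refine List.cons_eq_cons.mpr ⟨by simp, ?_⟩
      apply List.map_congr_left
      intro p _
      simpa using pvGshift ls l p
    · have hpv : pvHs (l :: ls) = (pvHs ls).map (· + 1) := by simp [pvHs, hl]
      have h4 : ((pvHs ls).map (· + 1)).tail ++ [ls.length + 1]
          = (((pvHs ls).tail ++ [ls.length]).map (· + 1)) := by cases pvHs ls <;> simp
      rw [hgf, if_neg hl, hheadD]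
      unfold pvBn
      rw [hpv]
      simp only [List.length_cons]
      rw [h3, h4, hsplit]
      simp only [List.map_cons, List.headD_cons, List.zip_map, List.map_map]
      refine List.cons_eq_cons.mpr ⟨?_, ?_⟩
      · simp [List.take_succ_cons]
      · apply List.map_congr_left
        intro p _
        simpa using pvGshift ls l p

-- ===== VERDICT (by name: the statement is the Claim_ definition above) =====
theorem split_res_spec : Claim_equal_split_res := by
  intro all_lines _ hpre
  unfold Spec_split_res split_res
  rw [pvFoldA all_lines [] [] "" hpre, pvGo_goF, pvBn_eq, pvBn_goF]
  obtain ⟨b, rest, hb⟩ := pvGoF_head_fst all_lines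
  simp [hb]
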